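-- pv_equiv track=rewrite | github.com/jigglypop/github-fork | 코테/1.py | solution
-- ===== SOURCE A (Python) =====
-- def solution(votes):
--     me = votes[0]
--     another = votes[1:]
--     if len(another) == 0:
--         return 0
--     result = 0
--     while True:
--         another.sort(reverse=True)
--         if me <= another[0]:
--             another[0] -= 1
--             me += 1
--             result += 1
--         else:
--             break
--     return result
-- ===== SOURCE B (Python) =====
-- def solution(votes):
--     me = votes[0]
--     others = votes[1:]
--     # binary search on the number of transfers k: k suffices iff the total
--     # surplus above level me+k-1 can be absorbed by k removals
--     def feasible(k):
--         return sum(max(0, a - (me + k - 1)) for a in others) <= k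
--     lo, hi = 0, sum(max(0, a - (me - 1)) for a in others)
--     while lo < hi:
--         mid = (lo + hi) // 2
--         if feasible(mid):
--             hi = mid
--         else:
--             lo = mid + 1
--     return lo
-- ===== Notes on version B (the rewrite author's own statement) =====
-- stated objective: faster
-- what changed: A simulates the transfers one by one, re-sorting the opponent list before every single transfer; B binary-searches the number of transfers k using the feasibility test 'total surplus above level me+k-1 is at most k', one O(n) sum per probe.
import Mathlib
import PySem

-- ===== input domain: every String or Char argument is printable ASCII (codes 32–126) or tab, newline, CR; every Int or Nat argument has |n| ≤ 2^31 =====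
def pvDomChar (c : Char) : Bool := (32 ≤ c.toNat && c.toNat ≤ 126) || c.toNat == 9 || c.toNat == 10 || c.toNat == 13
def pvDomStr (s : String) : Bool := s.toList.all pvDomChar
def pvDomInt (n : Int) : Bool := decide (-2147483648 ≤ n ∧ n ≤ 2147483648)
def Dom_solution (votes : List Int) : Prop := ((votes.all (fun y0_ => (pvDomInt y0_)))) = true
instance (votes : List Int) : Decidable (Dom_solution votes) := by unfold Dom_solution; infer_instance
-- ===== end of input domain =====

-- B replaces A's re-sort-and-decrement simulation by a binary search on the number of
-- transfers k (feasibility: surplus above level me+k-1 is at most k); equal return values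
-- on all nonempty inputs (A mutates only its local slice copy; the argument is unchanged).


-- ===== PORT A =====
-- the while-loop of A: re-sort descending, compare me with the top, transfer one vote.
-- fuel only makes the loop total; solution passes enough for it never to run out
-- (each iteration raises me by 1 and never raises the maximum, see solLoopF_least).
def solLoopF : Nat → Int → Int → List Int → Int
  | 0, _, result, _ => result
  | fuel + 1, me, result, another =>
    match PySem.List.sorted another (fun x => x) true with
    | [] => result          -- unreachable: the loop is only entered with a nonempty list
    | a0 :: rest =>
      if me ≤ a0 then solLoopF fuel (me + 1) (result + 1) ((a0 - 1) :: rest)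
      else result

def solution (votes : List Int) : Int :=
  match PySem.List.pyGet? votes 0 with
  | none => 0               -- unreachable under Pre_: Python raises IndexError on []
  | some me =>
    let another := PySem.List.slice votes (some 1) none
    if PySem.List.len another = 0 then 0
    else solLoopF ((another.foldl max 0) - me + 1).toNat me 0 another

-- ===== PORT B =====
-- sum(max(0, a - L) for a in xs): total surplus above level L
def cost (L : Int) (xs : List Int) : Int := (xs.map (fun a => max 0 (a - L))).sum

-- the while-loop of B: binary search for the least feasible number of transfers;
-- fuel only makes the loop total (hi - lo shrinks by at least 1 per iteration)
def bsLoopF : Nat → Int → List Int → Int → Int → Int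
  | 0, _, _, lo, _ => lo
  | fuel + 1, me, others, lo, hi =>
    if lo < hi then
      let mid := PySem.Int.floordiv (lo + hi) 2
      if cost (me + mid - 1) others ≤ mid then bsLoopF fuel me others lo mid
      else bsLoopF fuel me others (mid + 1) hi
    else lo

def solution_alt (votes : List Int) : Int :=
  match PySem.List.pyGet? votes 0 with
  | none => 0               -- unreachable under Pre_: Python raises IndexError on []
  | some me =>
    let others := PySem.List.slice votes (some 1) none
    bsLoopF (cost (me - 1) others).toNat me others 0 (cost (me - 1) others)

-- ===== PRECONDITION & SPEC =====
-- Pre_ excludes only the empty list, on which A raises IndexError (votes[0]).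
def Pre_solution (votes : List Int) : Prop := votes ≠ []
instance (votes : List Int) : Decidable (Pre_solution votes) := by unfold Pre_solution; infer_instance
def pvWitness_solution : List Int := [5, 7, 3]

def Spec_solution (votes : List Int) (out : Int) : Prop := out = solution_alt votes
instance (votes : List Int) (out : Int) : Decidable (Spec_solution votes out) := by unfold Spec_solution; infer_instance

-- ===== CLAIM (what is proved, stated in full; the proofs are below) =====
def Claim_equal_solution : Prop := ∀ (votes : List Int), Dom_solution votes → Pre_solution votes → Spec_solution votes (solution votes)

-- ===== LEMMAS AND PROOFS =====

-- feasibility: k transfers suffice to put me strictly above every opponent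
def feas (me : Int) (xs : List Int) (k : Int) : Prop := cost (me + k - 1) xs ≤ k

def isLeast (me : Int) (xs : List Int) (k : Int) : Prop :=
  0 ≤ k ∧ feas me xs k ∧ ∀ j : Int, 0 ≤ j → j < k → ¬ feas me xs j

theorem cost_nonneg (L : Int) (xs : List Int) : 0 ≤ cost L xs := by
  apply List.sum_nonneg
  intro x hx
  simp only [List.mem_map] at hx
  obtain ⟨a, _, rfl⟩ := hx
  exact le_max_left _ _

theorem cost_mono (L L' : Int) (xs : List Int) (h : L ≤ L') : cost L' xs ≤ cost L xs := by
  apply List.sum_le_sum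
  intro a _
  exact max_le_max le_rfl (by omega)

theorem cost_perm (L : Int) {xs ys : List Int} (h : xs.Perm ys) : cost L xs = cost L ys :=
  (h.map _).sum_eq

theorem cost_zero_of_le (L : Int) (xs : List Int) (h : ∀ a ∈ xs, a ≤ L) : cost L xs = 0 := by
  unfold cost
  rw [List.sum_eq_zero]
  intro x hx
  simp only [List.mem_map] at hx
  obtain ⟨a, ha, rfl⟩ := hx
  have := h a ha
  omega

theorem cost_cons (L a : Int) (xs : List Int) :
    cost L (a :: xs) = max 0 (a - L) + cost L xs := by
  simp [cost]

theorem feas_mono (me : Int) (xs : List Int) {j j' : Int} (h : feas me xs j) (hjj : j ≤ j') :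
    feas me xs j' := by
  unfold feas at *
  calc cost (me + j' - 1) xs ≤ cost (me + j - 1) xs := cost_mono _ _ _ (by omega)
    _ ≤ j := h
    _ ≤ j' := hjj

theorem feas_step (me a0 : Int) (rest : List Int) (ha : ∀ x ∈ rest, x ≤ a0)
    {j : Int} (hj : 1 ≤ j) :
    feas me (a0 :: rest) j ↔ feas (me + 1) ((a0 - 1) :: rest) (j - 1) := by
  unfold feas
  have hL : me + 1 + (j - 1) - 1 = me + j - 1 := by ring
  rw [hL, cost_cons, cost_cons]
  rcases le_or_gt a0 (me + j - 1) with hle | hlt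
  · have h0 : cost (me + j - 1) rest = 0 :=
      cost_zero_of_le _ _ (fun x hx => le_trans (ha x hx) hle)
    rw [h0]
    have h1 : max 0 (a0 - (me + j - 1)) = 0 := by omega
    have h2 : max 0 (a0 - 1 - (me + j - 1)) = 0 := by omega
    rw [h1, h2]
    omega
  · have h1 : max 0 (a0 - (me + j - 1)) = a0 - (me + j - 1) := by omega
    have h2 : max 0 (a0 - 1 - (me + j - 1)) = a0 - 1 - (me + j - 1) := by omega
    rw [h1, h2]
    omega

-- isLeast 0 whenever me already beats the maximum
theorem isLeast_zero (me : Int) (xs : List Int) (hmax : ∀ a ∈ xs, a ≤ me - 1) :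
    isLeast me xs 0 := by
  refine ⟨le_rfl, ?_, by omega⟩
  unfold feas
  have h0 : cost (me + 0 - 1) xs = 0 :=
    cost_zero_of_le _ _ (fun a ha => by have := hmax a ha; omega)
  omega

-- A's loop computes (result +) the least feasible transfer count, given enough fuel
theorem solLoopF_least (fuel : Nat) (me result : Int) (xs : List Int) (hxs : xs ≠ [])
    (hfuel : ((xs.foldl max 0) - me + 1).toNat ≤ fuel) :
    isLeast me xs (solLoopF fuel me result xs - result) := by
  induction fuel generalizing me result xs with
  | zero =>
    -- no fuel needed: me already beats the running maximum of xs
    have hM0 : (0:Int) ≤ xs.foldl max 0 := (PySem.List.le_foldl_max xs 0).1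
    have hMa : ∀ a ∈ xs, a ≤ xs.foldl max 0 := (PySem.List.le_foldl_max xs 0).2
    have : solLoopF 0 me result xs - result = 0 := by simp [solLoopF]
    rw [this]
    exact isLeast_zero me xs (fun a ha => by have := hMa a ha; omega)
  | succ fuel ih =>
    rw [solLoopF]
    cases h : PySem.List.sorted xs (fun x => x) true with
    | nil => exact absurd ((PySem.List.sorted_eq_nil_iff _ _ _).mp h) hxs
    | cons a0 rest =>
      have hperm : (a0 :: rest).Perm xs := h ▸ PySem.List.sorted_perm xs (fun x => x) true
      have hmemall : ∀ y ∈ xs, y ≤ a0 := PySem.List.key_head_sorted_rev_ge _ (fun x => x) h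
      have hfeq : ∀ j : Int, feas me xs j ↔ feas me (a0 :: rest) j := by
        intro j; unfold feas; rw [cost_perm _ hperm]
      dsimp only
      by_cases hle : me ≤ a0
      · rw [if_pos hle]
        have hrest : ∀ x ∈ rest, x ≤ a0 := fun x hx =>
          hmemall x ((PySem.List.mem_sorted _ _ _ _).mp (h ▸ List.mem_cons_of_mem a0 hx))
        -- the maximum does not grow, me grows: fuel bound holds for the recursive call
        have ha0 : a0 ∈ xs := (PySem.List.mem_sorted _ _ _ _).mp (h ▸ List.mem_cons_self)
        have hM0 : (0:Int) ≤ xs.foldl max 0 := (PySem.List.le_foldl_max xs 0).1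
        have hMa : a0 ≤ xs.foldl max 0 := (PySem.List.le_foldl_max xs 0).2 a0 ha0
        have hnew : ((a0 - 1) :: rest).foldl max 0 ≤ xs.foldl max 0 := by
          rcases PySem.List.foldl_max_mem ((a0 - 1) :: rest) 0 with h0 | hm
          · omega
          · rcases List.mem_cons.mp hm with he | hr
            · omega
            · have hrA : ((a0 - 1) :: rest).foldl max 0 ∈ xs :=
                (PySem.List.mem_sorted _ _ _ _).mp (h ▸ List.mem_cons_of_mem a0 hr)
              exact le_trans (hmemall _ hrA) hMa
        have ih' := ih (me + 1) (result + 1) ((a0 - 1) :: rest) (by simp) (by omega)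
        set k' := solLoopF fuel (me + 1) (result + 1) ((a0 - 1) :: rest) - (result + 1) with hk'
        obtain ⟨hk0, hkf, hkmin⟩ := ih'
        have harith : solLoopF fuel (me + 1) (result + 1) ((a0 - 1) :: rest) - result = k' + 1 := by
          omega
        rw [harith]
        refine ⟨by omega, ?_, ?_⟩
        · rw [hfeq, feas_step me a0 rest hrest (by omega)]
          simpa using hkf
        · intro j hj0 hjk
          rw [hfeq]
          rcases eq_or_lt_of_le hj0 with rfl | hpos
          · -- j = 0: the top opponent still ties or beats me, so cost (me-1) ≥ 1
            intro hf
            unfold feas at hf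
            rw [cost_cons] at hf
            have := cost_nonneg (me + 0 - 1) rest
            have : max 0 (a0 - (me + 0 - 1)) ≥ a0 - me + 1 := by omega
            omega
          · rw [feas_step me a0 rest hrest (by omega)]
            exact fun hf => hkmin (j - 1) (by omega) (by omega) hf
      · rw [if_neg hle]
        have : result - result = 0 := by omega
        rw [this]
        exact isLeast_zero me xs (fun a ha => by have := hmemall a ha; omega)

-- B's binary search returns the least feasible transfer count
theorem bsLoopF_least (fuel : Nat) (me : Int) (xs : List Int) (lo hi k : Int)
    (hfuel : (hi - lo).toNat ≤ fuel) (hlo : 0 ≤ lo) (hk : isLeast me xs k)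
    (h1 : lo ≤ k) (h2 : k ≤ hi) :
    bsLoopF fuel me xs lo hi = k := by
  induction fuel generalizing lo hi with
  | zero => simp only [bsLoopF]; omega
  | succ fuel ih =>
    rw [bsLoopF]
    by_cases hlt : lo < hi
    · rw [if_pos hlt]
      set mid := PySem.Int.floordiv (lo + hi) 2 with hm
      have hmidlo : lo ≤ mid :=
        (PySem.Int.le_floordiv_iff_mul_le (a := lo + hi) (b := 2) (q := lo) (by omega)).mpr (by omega)
      have hmidhi : mid < hi :=
        (PySem.Int.floordiv_lt_iff_lt_mul (a := lo + hi) (b := 2) (q := hi) (by omega)).mpr (by omega)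
      by_cases hfeas : cost (me + mid - 1) xs ≤ mid
      · rw [if_pos hfeas]
        -- mid feasible ⇒ k ≤ mid (k is least, mid ≥ 0)
        have hkmid : k ≤ mid := by
          by_contra hc
          exact hk.2.2 mid (by omega) (by omega) hfeas
        exact ih lo mid (by omega) hlo h1 hkmid
      · rw [if_neg hfeas]
        -- mid infeasible ⇒ mid < k (feas k holds and feas is monotone)
        have hkmid : mid + 1 ≤ k := by
          by_contra hc
          exact hfeas (feas_mono me xs hk.2.1 (by omega))
        exact ih (mid + 1) hi (by omega) (by omega) hkmid h2
    · rw [if_neg hlt]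
      omega

theorem least_le_cost (me : Int) (xs : List Int) {k : Int} (hk : isLeast me xs k) :
    k ≤ cost (me - 1) xs := by
  by_contra hc
  have hhi : feas me xs (cost (me - 1) xs) := by
    unfold feas
    exact le_trans (cost_mono _ _ _ (by have := cost_nonneg (me - 1) xs; omega)) le_rfl
  exact hk.2.2 _ (cost_nonneg _ _) (by omega) hhi

-- ===== VERDICT (by name: the statement is the Claim_ definition above) =====
theorem solution_spec : Claim_equal_solution := by
  intro votes _ hpre
  unfold Spec_solution solution solution_alt
  match votes, hpre with
  | me :: rest, _ =>
    simp only [PySem.List.pyGet?_zero_cons, PySem.List.slice_from_one, List.tail_cons,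
      PySem.List.len_eq]
    rcases rest with _ | ⟨r, rs⟩
    · simp [bsLoopF, cost]
    · simp only [List.length_cons, Nat.cast_add, Nat.cast_one]
      rw [if_neg (by omega)]
      have hk : isLeast me (r :: rs)
          (solLoopF (((r :: rs).foldl max 0) - me + 1).toNat me 0 (r :: rs)) := by
        have := solLoopF_least (((r :: rs).foldl max 0) - me + 1).toNat me 0 (r :: rs)
          (by simp) le_rfl
        simpa using this
      rw [bsLoopF_least (cost (me - 1) (r :: rs)).toNat me (r :: rs) 0
        (cost (me - 1) (r :: rs)) _
        (by have := least_le_cost me (r :: rs) hk; have := cost_nonneg (me - 1) (r :: rs); omega)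
        le_rfl hk hk.1 (by have := least_le_cost me (r :: rs) hk; have := cost_nonneg (me - 1) (r :: rs); omega)]
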